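-- pv_equiv track=rewrite | github.com/HuayuChen2004/NumberWeave | solution.py | check_row_fill
-- ===== SOURCE A (Python) =====
-- def check_row_fill(size, row_count, row):
--     current_row_count = []
--     count = 0
--     for i in range(size):
--         if row[i] == 1:
--             count += 1
--         elif count:
--             current_row_count.append(count)
--             count = 0
--     if count:
--         current_row_count.append(count)
--     return current_row_count == row_count
-- ===== SOURCE B (Python) =====
-- def _scan_ones(row, size, j):
--     # advance j past the current run of 1s (bounded by size)
--     while j < size and row[j] == 1:
--         j += 1
--     return j
--
--
-- def check_row_fill(size, row_count, row):
--     # two-pointer span scan: jump over each maximal run of 1s at once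
--     runs = []
--     i = 0
--     while i < size:
--         if row[i] == 1:
--             j = _scan_ones(row, size, i + 1)
--             runs.append(j - i)
--             i = j
--         else:
--             i += 1
--     return runs == row_count
-- ===== Notes on version B (the rewrite author's own statement) =====
-- stated objective: alternative
-- what changed: Replaces A's single pass with a running counter and append-on-break flush by a two-pointer span scan that locates each maximal run of 1s with an inner pointer advance and appends its length in one step.
import Mathlib
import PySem

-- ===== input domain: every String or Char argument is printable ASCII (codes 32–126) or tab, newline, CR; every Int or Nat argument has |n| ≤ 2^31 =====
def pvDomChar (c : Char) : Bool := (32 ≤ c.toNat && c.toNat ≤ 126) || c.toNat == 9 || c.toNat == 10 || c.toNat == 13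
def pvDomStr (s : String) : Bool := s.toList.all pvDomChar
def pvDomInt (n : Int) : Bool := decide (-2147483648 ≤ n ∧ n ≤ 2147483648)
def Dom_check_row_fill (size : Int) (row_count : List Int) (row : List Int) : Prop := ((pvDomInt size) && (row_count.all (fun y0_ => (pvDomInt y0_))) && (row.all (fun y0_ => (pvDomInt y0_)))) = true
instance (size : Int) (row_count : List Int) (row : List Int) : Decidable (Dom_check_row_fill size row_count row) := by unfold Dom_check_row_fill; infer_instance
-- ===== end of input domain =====

-- B replaces A's running-counter-with-flush pass by a two-pointer span scan over runs of 1s (alternative decomposition, same cost).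


-- ===== PORT A =====
-- one loop step of A: if row[i]==1 bump count, elif count flush it
def stepA (row : List Int) (s : List Int × Int) (i : Int) : List Int × Int :=
  if PySem.List.pyGetD row i 0 == 1 then (s.1, s.2 + 1)
  else if s.2 ≠ 0 then (s.1 ++ [s.2], 0) else (s.1, 0)

-- the trailing 'if count: append' after the loop
def finishA (s : List Int × Int) : List Int :=
  if s.2 ≠ 0 then s.1 ++ [s.2] else s.1

def check_row_fill (size : Int) (row_count : List Int) (row : List Int) : Bool :=
  finishA ((PySem.List.pyRange 0 size 1).foldl (stepA row) ([], 0)) == row_count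

-- ===== PORT B =====
-- inner while of _scan_ones: advance j past the current run of 1s
-- (fuel = remaining iterations (size - j).toNat, a totality device only)
def scanOnesF (row : List Int) (size : Int) : Nat → Int → Int
  | 0, j => j
  | fuel + 1, j =>
    if j < size ∧ PySem.List.pyGetD row j 0 == 1 then scanOnesF row size fuel (j + 1) else j

def scanOnes (row : List Int) (size j : Int) : Int := scanOnesF row size (size - j).toNat j

-- outer while of B: two-pointer span scan accumulating run lengths (fuel as above)
def bLoopF (row : List Int) (size : Int) : Nat → Int → List Int → List Int
  | 0, _, runs => runs
  | fuel + 1, i, runs =>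
    if i < size then
      if PySem.List.pyGetD row i 0 == 1 then
        let j := scanOnes row size (i + 1)
        bLoopF row size fuel j (runs ++ [j - i])
      else bLoopF row size fuel (i + 1) runs
    else runs

def check_row_fill_alt (size : Int) (row_count : List Int) (row : List Int) : Bool :=
  bLoopF row size size.toNat 0 [] == row_count

-- ===== PRECONDITION & SPEC =====
-- Pre_ excludes exactly the inputs where Python A raises IndexError: size > len(row).
def Pre_check_row_fill (size : Int) (row_count : List Int) (row : List Int) : Prop :=
  size ≤ (row.length : Int)
instance (size : Int) (row_count : List Int) (row : List Int) : Decidable (Pre_check_row_fill size row_count row) := by unfold Pre_check_row_fill; infer_instance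

def pvWitness_check_row_fill : Int × List Int × List Int := (3, [1, 1], [1, 0, 1])

def Spec_check_row_fill (size : Int) (row_count : List Int) (row : List Int) (out : Bool) : Prop := out = check_row_fill_alt size row_count row
instance (size : Int) (row_count : List Int) (row : List Int) (out : Bool) : Decidable (Spec_check_row_fill size row_count row out) := by unfold Spec_check_row_fill; infer_instance

-- ===== CLAIM (what is proved, stated in full; the proofs are below) =====
def Claim_equal_check_row_fill : Prop := ∀ (size : Int) (row_count : List Int) (row : List Int), Dom_check_row_fill size row_count row → Pre_check_row_fill size row_count row → Spec_check_row_fill size row_count row (check_row_fill size row_count row)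

-- ===== LEMMAS AND PROOFS =====

-- A's loop from index i onward with accumulated state (acc, c), followed by the flush
def Afrom (row : List Int) (size i : Int) (acc : List Int) (c : Int) : List Int :=
  finishA ((PySem.List.pyRange i size 1).foldl (stepA row) (acc, c))

-- B's outer loop with its canonical fuel
def bLoop (row : List Int) (size i : Int) (runs : List Int) : List Int :=
  bLoopF row size (size - i).toNat i runs

theorem le_scanOnesF (row : List Int) (size : Int) :
    ∀ (fuel : Nat) (j : Int), j ≤ scanOnesF row size fuel j := by
  intro fuel
  induction fuel with
  | zero => intro j; simp [scanOnesF]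
  | succ n ih =>
    intro j
    simp only [scanOnesF]
    split
    · have := ih (j + 1); omega
    · omega

theorem le_scanOnes (row : List Int) (size j : Int) : j ≤ scanOnes row size j :=
  le_scanOnesF row size _ j

theorem scanOnes_stop (row : List Int) (size j : Int)
    (h : ¬ (j < size ∧ PySem.List.pyGetD row j 0 == 1)) : scanOnes row size j = j := by
  unfold scanOnes
  rcases Nat.eq_zero_or_pos (size - j).toNat with h0 | h0
  · rw [h0]; rfl
  · obtain ⟨m, hm⟩ : ∃ m, (size - j).toNat = m + 1 := ⟨(size - j).toNat - 1, by omega⟩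
    rw [hm]; simp only [scanOnesF]; rw [if_neg h]

theorem scanOnes_step (row : List Int) (size j : Int)
    (h : j < size ∧ PySem.List.pyGetD row j 0 == 1) :
    scanOnes row size j = scanOnes row size (j + 1) := by
  unfold scanOnes
  have hm : (size - j).toNat = (size - (j + 1)).toNat + 1 := by omega
  rw [hm]; simp only [scanOnesF]; rw [if_pos h]

-- fuel irrelevance: any sufficient fuel computes the canonical-fuel result
theorem bLoopF_congr (row : List Int) (size : Int) :
    ∀ (fuel : Nat) (i : Int) (runs : List Int), (size - i).toNat ≤ fuel →
      bLoopF row size fuel i runs = bLoop row size i runs := by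
  intro fuel
  induction fuel using Nat.strong_induction_on with
  | _ fuel ih =>
    intro i runs h
    by_cases hi : i < size
    · obtain ⟨f, rfl⟩ : ∃ f, fuel = f + 1 := ⟨fuel - 1, by omega⟩
      have hm : (size - i).toNat = (size - (i + 1)).toNat + 1 := by omega
      conv_rhs => rw [bLoop, hm]
      simp only [bLoopF, hi, if_true]
      have hj : i + 1 ≤ scanOnes row size (i + 1) := le_scanOnes row size (i + 1)
      split
      · rw [ih f (by omega) _ _ (by omega),
            ih (size - (i + 1)).toNat (by omega) _ _ (by omega)]
      · rw [ih f (by omega) _ _ (by omega),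
            ih (size - (i + 1)).toNat (by omega) _ _ (by omega)]
    · have l : ∀ f, bLoopF row size f i runs = runs := by
        intro f; cases f <;> simp [bLoopF, hi]
      rw [l, bLoop]
      have h0 : (size - i).toNat = 0 := by omega
      rw [h0]
      exact (l 0).symm ▸ rfl

theorem bLoop_stop (row : List Int) (size i : Int) (runs : List Int) (h : size ≤ i) :
    bLoop row size i runs = runs := by
  unfold bLoop
  have h0 : (size - i).toNat = 0 := by omega
  rw [h0]
  rfl

theorem bLoop_step (row : List Int) (size i : Int) (runs : List Int) (h : i < size) :
    bLoop row size i runs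
      = if PySem.List.pyGetD row i 0 == 1 then
          bLoop row size (scanOnes row size (i + 1)) (runs ++ [scanOnes row size (i + 1) - i])
        else bLoop row size (i + 1) runs := by
  conv_lhs => unfold bLoop
  have hm : (size - i).toNat = (size - (i + 1)).toNat + 1 := by omega
  rw [hm]
  simp only [bLoopF, h, if_true]
  split
  · have hj : i + 1 ≤ scanOnes row size (i + 1) := le_scanOnes row size (i + 1)
    exact bLoopF_congr row size _ _ _ (by omega)
  · exact bLoopF_congr row size _ _ _ (by omega)

theorem Afrom_stop (row : List Int) (size i : Int) (acc : List Int) (c : Int) (h : size ≤ i) :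
    Afrom row size i acc c = finishA (acc, c) := by
  simp [Afrom, PySem.List.pyRange_one_eq_nil h]

theorem Afrom_step (row : List Int) (size i : Int) (acc : List Int) (c : Int) (h : i < size) :
    Afrom row size i acc c = Afrom row size (i + 1) (stepA row (acc, c) i).1 (stepA row (acc, c) i).2 := by
  simp [Afrom, PySem.List.pyRange_one_cons h]

-- run sublemma: while in a run of 1s (count c > 0), A flushes exactly the span length
theorem Afrom_run (row : List Int) (size : Int) : ∀ (j : Int) (acc : List Int) (c : Int), 0 < c →
    Afrom row size j acc c
      = Afrom row size (scanOnes row size j) (acc ++ [c + (scanOnes row size j - j)]) 0 := by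
  intro j acc c hc
  by_cases h : j < size ∧ PySem.List.pyGetD row j 0 == 1
  · rw [scanOnes_step row size j h]
    rw [Afrom_step row size j acc c h.1]
    have hstep : stepA row (acc, c) j = (acc, c + 1) := by
      simp [stepA, h.2]
    rw [hstep]
    rw [Afrom_run row size (j + 1) acc (c + 1) (by omega)]
    have harith : c + 1 + (scanOnes row size (j + 1) - (j + 1)) = c + (scanOnes row size (j + 1) - j) := by omega
    rw [harith]
  · rw [scanOnes_stop row size j h]
    by_cases hj : j < size
    · have hne : ¬ (PySem.List.pyGetD row j 0 == 1) = true := by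
        intro hx; exact h ⟨hj, hx⟩
      rw [Afrom_step row size j acc c hj, Afrom_step row size j (acc ++ [c + (j - j)]) 0 hj]
      have h1 : stepA row (acc, c) j = (acc ++ [c], 0) := by
        simp [stepA, hne]; omega
      have h2 : stepA row (acc ++ [c + (j - j)], 0) j = (acc ++ [c], 0) := by
        simp [stepA, hne]
      rw [h1, h2]
    · rw [Afrom_stop row size j acc c (by omega),
          Afrom_stop row size j (acc ++ [c + (j - j)]) 0 (by omega)]
      simp [finishA]
      omega
termination_by j => (size - j).toNat
decreasing_by omega

-- main invariant: A's remaining loop with count 0 equals B's outer loop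
theorem Afrom_eq_bLoop (row : List Int) (size : Int) : ∀ (i : Int) (acc : List Int),
    Afrom row size i acc 0 = bLoop row size i acc := by
  intro i acc
  by_cases hi : i < size
  · rw [bLoop_step row size i acc hi]
    by_cases h1 : PySem.List.pyGetD row i 0 == 1
    · simp only [h1, if_true]
      rw [Afrom_step row size i acc 0 hi]
      have hstep : stepA row (acc, 0) i = (acc, 1) := by simp [stepA, h1]
      rw [hstep]
      rw [Afrom_run row size (i + 1) acc 1 (by omega)]
      have h1j : 1 + (scanOnes row size (i + 1) - (i + 1)) = scanOnes row size (i + 1) - i := by omega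
      rw [h1j]
      exact Afrom_eq_bLoop row size (scanOnes row size (i + 1)) (acc ++ [scanOnes row size (i + 1) - i])
    · rw [if_neg h1]
      rw [Afrom_step row size i acc 0 hi]
      have hstep : stepA row (acc, 0) i = (acc, 0) := by simp [stepA, h1]
      rw [hstep]
      exact Afrom_eq_bLoop row size (i + 1) acc
  · rw [Afrom_stop row size i acc 0 (by omega), bLoop_stop row size i acc (by omega)]
    simp [finishA]
termination_by i => (size - i).toNat
decreasing_by
  · have := le_scanOnes row size (i + 1); omega
  · omega

-- ===== VERDICT (by name: the statement is the Claim_ definition above) =====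
theorem check_row_fill_spec : Claim_equal_check_row_fill := by
  intro size row_count row _ _
  unfold Spec_check_row_fill check_row_fill check_row_fill_alt
  have : bLoopF row size size.toNat 0 [] = bLoop row size 0 [] := by
    unfold bLoop; norm_num
  rw [this, ← Afrom_eq_bLoop row size 0 []]
  rfl
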